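-- pv_equiv track=rewrite | github.com/mouradap/bioFellow | functions.py | revTranslation
-- ===== SOURCE A (Python) =====
-- def revTranslation(aminoacidSeq):
-- 	codons = {
--
-- 		"TTT": "F", "TTC": "F", "TTA": "L", "TTG": "L",
-- 		"TCT": "S", "TCC": "S", "TCA": "S", "TCG": "S",
-- 		"TAT": "Y", "TAC": "Y", "TAA": "*", "TAG": "*",
-- 		"TGT": "C", "TGC": "C", "TGA": "*", "TGG": "W",
-- 		"CTT": "L", "CTC": "L", "CTA": "L", "CTG": "L",
-- 		"CCT": "P", "CCC": "P", "CCA": "P", "CCG": "P",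
-- 		"CAT": "H", 'CAC': 'H', 'CAA': 'Q', 'CAG': 'Q',
-- 		'CGT': 'R', 'CGC': 'R', 'CGA': 'R', 'CGG': 'R',
-- 		'ATT': 'I', 'ATC': 'I', 'ATA': 'I', 'ATG': 'M',
-- 		'ACT': 'T', 'ACC': 'T', 'ACA': 'T', 'ACG': 'T',
-- 		'AAT': 'N', 'AAC': 'N', 'AAA': 'K', 'AAG': 'K',
-- 		'AGT': 'S', 'AGC': 'S', 'AGA': 'R', 'AGG': 'R',
-- 		'GTT': 'V', 'GTC': 'V', 'GTA': 'V', 'GTG': 'V',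
-- 		'GCT': 'A', 'GCC': 'A', 'GCA': 'A', 'GCG': 'A',
-- 		'GAT': 'D', 'GAC': 'D', 'GAA': 'E', 'GAG': 'E',
-- 		'GGT': 'G', 'GGC': 'G', 'GGA': 'G', 'GGG': 'G'
-- 	}
--
--
-- 	revTrans = ""
--
-- 	for pos in range(len(aminoacidSeq)):
-- 		aa = aminoacidSeq[pos].upper()
-- 		aaList = []
-- 		for key in codons:
-- 			aaList.append(codons[key])
--
-- 		if aa not in aaList:
-- 			return "Invalid Aminoacid"
--
-- 		for key in codons:
-- 			if codons[key] == aa: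
-- 				codon = key
-- 				revTrans += codon
-- 				break
--
-- 	return revTrans
-- ===== SOURCE B (Python) =====
-- def revTranslation(aminoacidSeq):
-- 	# direct amino-acid -> codon table (first codon of each amino acid in the genetic code table)
-- 	rev = {
-- 		'F': 'TTT', 'L': 'TTA', 'S': 'TCT', 'Y': 'TAT', '*': 'TAA',
-- 		'C': 'TGT', 'W': 'TGG', 'P': 'CCT', 'H': 'CAT', 'Q': 'CAA',
-- 		'R': 'CGT', 'I': 'ATT', 'M': 'ATG', 'T': 'ACT', 'N': 'AAT',
-- 		'K': 'AAA', 'V': 'GTT', 'A': 'GCT', 'D': 'GAT', 'E': 'GAA',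
-- 		'G': 'GGT',
-- 	}
-- 	try:
-- 		return ''.join(rev[aa.upper()] for aa in aminoacidSeq)
-- 	except KeyError:
-- 		return "Invalid Aminoacid"
-- ===== Notes on version B (the rewrite author's own statement) =====
-- stated objective: faster
-- what changed: B replaces A's per-character rebuild of the 64-entry codon-value list and linear key rescan with a fixed 21-entry amino-acid-to-codon table consulted once per character (join over a generator, KeyError as the invalid case).
import Mathlib
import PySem

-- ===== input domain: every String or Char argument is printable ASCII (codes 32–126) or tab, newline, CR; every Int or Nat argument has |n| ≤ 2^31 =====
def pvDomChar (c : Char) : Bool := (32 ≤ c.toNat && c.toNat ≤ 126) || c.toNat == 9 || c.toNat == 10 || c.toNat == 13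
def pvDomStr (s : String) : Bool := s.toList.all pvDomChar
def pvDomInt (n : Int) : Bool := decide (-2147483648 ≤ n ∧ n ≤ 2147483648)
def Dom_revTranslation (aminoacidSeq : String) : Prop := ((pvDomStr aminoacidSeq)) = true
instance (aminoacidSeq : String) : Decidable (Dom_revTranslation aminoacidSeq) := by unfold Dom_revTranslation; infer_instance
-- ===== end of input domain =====

-- B uses a fixed 21-entry amino-acid→codon table and one lookup per character (join over mapM),
-- instead of A's per-character rebuild of the 64-entry value list and linear key rescan (objective: faster, constant factor).

-- ===== PORT A =====
def pvCodons : PySem.Dict String String := PySem.Dict.ofList [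
  ("TTT", "F"), ("TTC", "F"), ("TTA", "L"), ("TTG", "L"),
  ("TCT", "S"), ("TCC", "S"), ("TCA", "S"), ("TCG", "S"),
  ("TAT", "Y"), ("TAC", "Y"), ("TAA", "*"), ("TAG", "*"),
  ("TGT", "C"), ("TGC", "C"), ("TGA", "*"), ("TGG", "W"),
  ("CTT", "L"), ("CTC", "L"), ("CTA", "L"), ("CTG", "L"),
  ("CCT", "P"), ("CCC", "P"), ("CCA", "P"), ("CCG", "P"),
  ("CAT", "H"), ("CAC", "H"), ("CAA", "Q"), ("CAG", "Q"),
  ("CGT", "R"), ("CGC", "R"), ("CGA", "R"), ("CGG", "R"),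
  ("ATT", "I"), ("ATC", "I"), ("ATA", "I"), ("ATG", "M"),
  ("ACT", "T"), ("ACC", "T"), ("ACA", "T"), ("ACG", "T"),
  ("AAT", "N"), ("AAC", "N"), ("AAA", "K"), ("AAG", "K"),
  ("AGT", "S"), ("AGC", "S"), ("AGA", "R"), ("AGG", "R"),
  ("GTT", "V"), ("GTC", "V"), ("GTA", "V"), ("GTG", "V"),
  ("GCT", "A"), ("GCC", "A"), ("GCA", "A"), ("GCG", "A"),
  ("GAT", "D"), ("GAC", "D"), ("GAA", "E"), ("GAG", "E"),
  ("GGT", "G"), ("GGC", "G"), ("GGA", "G"), ("GGG", "G")]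

-- the per-character loop of A: rebuild aaList, membership test, then scan for the first key
def pvAgo : List Char → List Char → Option (List Char)
  | acc, [] => some acc
  | acc, c :: rest =>
    let aa : String := String.ofList [PySem.Chars.upperChar c]
    -- for key in codons: aaList.append(codons[key])
    let aaList : List String := pvCodons.items.foldl (fun l kv => l ++ [kv.2]) []
    if aaList.contains aa then
      -- for key in codons: if codons[key] == aa: codon = key; revTrans += codon; break
      let acc' : List Char :=
        match pvCodons.items.find? (fun kv => kv.2 == aa) with
        | some kv => acc ++ kv.1.toList   -- first matching key, then break
        | none => acc                     -- unreachable: loop falls through without a match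
      pvAgo acc' rest
    else none                             -- return "Invalid Aminoacid"

def revTranslation (aminoacidSeq : String) : String :=
  match pvAgo [] aminoacidSeq.toList with
  | some cs => String.ofList cs
  | none => "Invalid Aminoacid"

-- ===== PORT B =====
-- the literal reverse table of Source B: amino acid → its first codon
def pvRev : PySem.Dict String String := PySem.Dict.ofList [
  ("F", "TTT"), ("L", "TTA"), ("S", "TCT"), ("Y", "TAT"), ("*", "TAA"),
  ("C", "TGT"), ("W", "TGG"), ("P", "CCT"), ("H", "CAT"), ("Q", "CAA"),
  ("R", "CGT"), ("I", "ATT"), ("M", "ATG"), ("T", "ACT"), ("N", "AAT"),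
  ("K", "AAA"), ("V", "GTT"), ("A", "GCT"), ("D", "GAT"), ("E", "GAA"),
  ("G", "GGT")]

-- ''.join(rev[aa.upper()] for aa in aminoacidSeq), KeyError ↦ none (stops at the first bad char, like the generator)
def revTranslation_alt (aminoacidSeq : String) : String :=
  match aminoacidSeq.toList.mapM (fun aa => pvRev.get? (String.ofList [PySem.Chars.upperChar aa])) with
  | some parts => PySem.Str.join "" parts
  | none => "Invalid Aminoacid"

-- ===== PRECONDITION & SPEC =====
def Spec_revTranslation (aminoacidSeq : String) (out : String) : Prop := out = revTranslation_alt aminoacidSeq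
instance (aminoacidSeq : String) (out : String) : Decidable (Spec_revTranslation aminoacidSeq out) := by unfold Spec_revTranslation; infer_instance

-- ===== CLAIM (what is proved, stated in full; the proofs are below) =====
def Claim_equal_revTranslation : Prop := ∀ (aminoacidSeq : String), Dom_revTranslation aminoacidSeq → Spec_revTranslation aminoacidSeq (revTranslation aminoacidSeq)

-- ===== LEMMAS AND PROOFS =====

-- per-character agreement of the two strategies, as a Boolean test
def pvStepTest (c : Char) : Bool :=
  let aa : String := String.ofList [PySem.Chars.upperChar c]
  let aaList : List String := pvCodons.items.foldl (fun l kv => l ++ [kv.2]) []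
  (aaList.contains aa == (pvRev.get? aa).isSome) &&
    ((pvCodons.items.find? (fun kv => kv.2 == aa)).map (·.1) == pvRev.get? aa)

set_option maxRecDepth 100000 in
lemma pvStepTest_all : ∀ n ∈ List.range 128, pvStepTest (Char.ofNat n) = true := by decide

lemma pvStepTest_dom (c : Char) (h : pvDomChar c = true) : pvStepTest c = true := by
  have hlt : c.toNat < 128 := by
    unfold pvDomChar at h
    simp only [Bool.or_eq_true, Bool.and_eq_true, decide_eq_true_eq, Nat.beq_eq_true_eq] at h
    omega
  have := pvStepTest_all c.toNat (List.mem_range.mpr hlt)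
  rwa [Char.ofNat_toNat c] at this

-- intercalate with an empty separator is flatten
lemma pvInter_nil : ∀ (ls : List (List Char)), List.intercalate ([]:List Char) ls = ls.flatten := by
  intro ls
  induction ls with
  | nil => rfl
  | cons a t ih =>
    cases t with
    | nil => simp [List.intercalate, List.intersperse]
    | cons b r =>
      simp only [List.intercalate, List.intersperse] at ih ⊢
      simp [ih]

-- ''.join over List Char: join "" parts is the concatenation of the parts' characters
lemma pvJoin_nil_eq (parts : List String) :
    PySem.Str.join "" parts = String.ofList (parts.flatMap String.toList) := by
  simp [PySem.Str.join, PySem.Chars.join, pvInter_nil, List.flatMap]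

-- A's accumulator loop computes acc ++ the concatenation of B's per-character lookups
lemma pvGo_eq (l : List Char) (h : l.all pvDomChar = true) (acc : List Char) :
    pvAgo acc l =
      (l.mapM (fun aa => pvRev.get? (String.ofList [PySem.Chars.upperChar aa]))).map
        (fun parts => acc ++ parts.flatMap String.toList) := by
  induction l generalizing acc with
  | nil => simp [pvAgo]
  | cons c rest ih =>
    simp only [List.all_cons, Bool.and_eq_true] at h
    have hstep := pvStepTest_dom c h.1
    simp only [pvStepTest, Bool.and_eq_true, beq_iff_eq] at hstep
    obtain ⟨h1, h2⟩ := hstep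
    rw [pvAgo, List.mapM_cons]
    rcases hget : pvRev.get? (String.ofList [PySem.Chars.upperChar c]) with _ | codon
    · rw [hget] at h1
      simp only [Option.isSome_none] at h1
      rw [if_neg (by rw [h1]; exact Bool.false_ne_true)]
      simp
    · rw [hget] at h1 h2
      simp only [Option.isSome_some] at h1
      rw [if_pos h1]
      rcases hfind : pvCodons.items.find? (fun kv => kv.2 == String.ofList [PySem.Chars.upperChar c]) with _ | kv
      · rw [hfind] at h2
        simp at h2
      · rw [hfind] at h2
        simp only [Option.map_some] at h2
        have hkv : kv.1 = codon := by injection h2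
        simp only [hfind, hkv, ih h.2]
        cases hrest : rest.mapM (fun aa => pvRev.get? (String.ofList [PySem.Chars.upperChar aa])) <;>
          simp [List.flatMap, List.append_assoc]

-- ===== VERDICT (by name: the statement is the Claim_ definition above) =====
theorem revTranslation_spec : Claim_equal_revTranslation := by
  intro s hdom
  unfold Spec_revTranslation revTranslation revTranslation_alt
  rw [pvGo_eq s.toList hdom []]
  cases h : s.toList.mapM (fun aa => pvRev.get? (String.ofList [PySem.Chars.upperChar aa])) with
  | none => rfl
  | some parts => simp [pvJoin_nil_eq]
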